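-- pv_equiv track=rewrite | github.com/juanjoowendler/de_todo_con_python | exercises/practicas_fuera_clases/Ficha_13-14-15-16_practicayejercicios/ejercicio7.py | mayores_6
-- ===== SOURCE A (Python) =====
-- def mayores_6(votos):
--     cant, band = 0, False
--     for i in votos:
--         if i == 6:
--             band = True
--         if band and i > 6:
--             cant += 1
--     return cant
-- ===== SOURCE B (Python) =====
-- def mayores_6(votos):
--     if 6 not in votos:
--         return 0
--     j = votos.index(6)
--     return sum(x > 6 for x in votos[j:])
-- ===== Notes on version B (the rewrite author's own statement) =====
-- stated objective: simpler
-- what changed: B replaces the flag-carrying single pass with a two-phase decomposition: locate the first 6 with list.index and count the >6 elements in the suffix slice.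
import Mathlib
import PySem

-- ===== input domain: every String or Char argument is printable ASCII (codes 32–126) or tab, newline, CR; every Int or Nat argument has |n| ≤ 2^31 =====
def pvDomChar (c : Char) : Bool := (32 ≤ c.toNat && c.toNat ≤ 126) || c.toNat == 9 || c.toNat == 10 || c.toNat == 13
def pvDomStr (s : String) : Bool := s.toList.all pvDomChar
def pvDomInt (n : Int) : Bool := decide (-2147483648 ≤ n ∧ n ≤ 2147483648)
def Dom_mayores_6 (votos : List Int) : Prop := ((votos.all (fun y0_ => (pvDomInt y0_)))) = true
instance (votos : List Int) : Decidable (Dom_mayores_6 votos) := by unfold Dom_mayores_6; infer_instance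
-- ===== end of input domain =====

-- B locates the first 6 and counts the >6 elements in the suffix slice, replacing A's flag-carrying single pass; same O(n) cost, simpler decomposition.

-- ===== PORT A =====
def mayores_6 (votos : List Int) : Int :=
  (votos.foldl (fun s i =>
      let band := if i == 6 then true else s.2
      (if band && decide (i > 6) then s.1 + 1 else s.1, band))
    ((0 : Int), false)).1

-- ===== PORT B =====
def mayores_6_alt (votos : List Int) : Int :=
  match PySem.List.index? votos 6 with
  | none => 0
  | some j =>
    (PySem.List.slice votos (some (j : Int)) none).foldl
      (fun acc x => acc + (if 6 < x then 1 else 0)) 0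

-- ===== PRECONDITION & SPEC =====
def Spec_mayores_6 (votos : List Int) (out : Int) : Prop := out = mayores_6_alt votos
instance (votos : List Int) (out : Int) : Decidable (Spec_mayores_6 votos out) := by unfold Spec_mayores_6; infer_instance

-- ===== CLAIM (what is proved, stated in full; the proofs are below) =====
def Claim_equal_mayores_6 : Prop := ∀ (votos : List Int), Dom_mayores_6 votos → Spec_mayores_6 votos (mayores_6 votos)

-- ===== LEMMAS AND PROOFS =====

-- A's loop body
def pvF (s : Int × Bool) (i : Int) : Int × Bool :=
  let band := if i == 6 then true else s.2
  (if band && decide (i > 6) then s.1 + 1 else s.1, band)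

-- B's counting body
def pvG (acc : Int) (x : Int) : Int := acc + (if 6 < x then 1 else 0)

lemma foldl_pvF_true (l : List Int) (c : Int) :
    l.foldl pvF (c, true) = (l.foldl pvG c, true) := by
  induction l generalizing c with
  | nil => rfl
  | cons x xs ih =>
      have hx : pvF (c, true) x = (pvG c x, true) := by
        simp only [pvF, pvG]
        split_ifs <;> simp_all
      simp only [List.foldl_cons, hx, ih]

lemma foldl_pvF_false_no6 (l : List Int) (h : (6 : Int) ∉ l) :
    l.foldl pvF (0, false) = (0, false) := by
  induction l with
  | nil => rfl
  | cons x xs ih =>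
      simp only [List.mem_cons, not_or] at h
      have hx : x ≠ 6 := fun e => h.1 e.symm
      simp only [List.foldl_cons, pvF]
      simp [hx, ih h.2]

-- ===== VERDICT (by name: the statement is the Claim_ definition above) =====

theorem mayores_6_spec : Claim_equal_mayores_6 := by
  intro votos _
  unfold Spec_mayores_6 mayores_6 mayores_6_alt
  show (votos.foldl pvF (0, false)).1 = _
  rcases h : PySem.List.index? votos 6 with _ | j
  · -- 6 not in votos: band stays false, cant stays 0
    have h6 : (6 : Int) ∉ votos := (PySem.List.index?_eq_none_iff votos 6).mp h
    rw [foldl_pvF_false_no6 votos h6]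
  · rcases (PySem.List.index?_eq_some_iff votos 6 j).mp h with ⟨pre, suf, hv, hlen, hpre⟩
    subst hv
    dsimp only
    rw [PySem.List.slice_from_natCast]
    have hdrop : (pre ++ 6 :: suf).drop j = 6 :: suf := by
      rw [← hlen, List.drop_left]
    rw [hdrop, List.foldl_append, foldl_pvF_false_no6 pre hpre]
    show (List.foldl pvF ((0 : Int), false) (6 :: suf)).1 = List.foldl pvG 0 (6 :: suf)
    simp only [List.foldl_cons]
    have h1 : pvF (0, false) 6 = (0, true) := by decide
    have h2 : pvG 0 6 = 0 := by decide
    rw [h1, h2, foldl_pvF_true]
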